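-- pv_equiv track=rewrite | github.com/MaxwellYan95/LeetCodeInterview | .idea/IBM_preparation/ArrayMeasure.py | user_logic
-- ===== SOURCE A (Python) =====
-- def user_logic(n, arr):
--     """
--     Write your logic here.
--     Parameters:
--         n (int): Number of elements in the array
--         arr (list of int): List of integers
--     Returns:
--         int: Computed result based on the problem statement
--     """
--     sortArr = sorted(arr)
--     sortIndex = {}
--     for index in range(len(sortArr)):
--         num = sortArr[index]
--         sortIndex[num] = index;
--     result = 0;
--     for index in range(len(arr)):
--         num = arr[index]
--         result += (sortIndex[num] + index);
--     return result
-- ===== SOURCE B (Python) =====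
-- def user_logic(n, arr):
--     # Rank of each element computed by direct counting (count of elements <= v,
--     # minus 1, i.e. the last sorted position of v), no sort and no index table.
--     total = 0
--     for i, v in enumerate(arr):
--         rank = sum(1 for x in arr if x <= v) - 1
--         total += rank + i
--     return total
-- ===== Notes on version B (the rewrite author's own statement) =====
-- stated objective: simpler
-- what changed: Replaces sort-then-dict-of-last-sorted-index with a single enumerate loop that computes each element's rank directly as (count of elements <= it) - 1; no sorting, no index table.
import Mathlib
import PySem

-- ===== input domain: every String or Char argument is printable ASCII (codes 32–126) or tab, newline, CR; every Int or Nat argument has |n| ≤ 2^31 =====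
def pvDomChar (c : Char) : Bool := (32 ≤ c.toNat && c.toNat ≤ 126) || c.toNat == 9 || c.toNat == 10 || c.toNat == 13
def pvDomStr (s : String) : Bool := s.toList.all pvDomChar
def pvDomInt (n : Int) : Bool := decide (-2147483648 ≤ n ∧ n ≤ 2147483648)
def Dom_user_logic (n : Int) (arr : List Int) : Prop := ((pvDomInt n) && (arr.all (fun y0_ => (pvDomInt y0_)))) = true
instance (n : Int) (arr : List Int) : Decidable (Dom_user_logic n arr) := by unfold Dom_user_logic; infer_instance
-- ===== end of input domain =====

-- B replaces the sort + last-index dict with a direct per-element rank count ((# of elements ≤ v) - 1); objective: simpler.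

-- ===== PORT A =====
def user_logic (n : Int) (arr : List Int) : Int :=
  let sortArr := PySem.List.sorted arr (fun x => x) false
  let sortIndex : PySem.Dict Int Int :=
    (PySem.List.pyRange 0 (PySem.List.len sortArr) 1).foldl
      (fun d index => d.insert (PySem.List.pyGetD sortArr index 0) index) PySem.Dict.empty
  -- sortIndex[num] never raises (num ∈ arr, a permutation of sortArr), so getD's default is never used
  (PySem.List.pyRange 0 (PySem.List.len arr) 1).foldl
    (fun result index => result + (sortIndex.getD (PySem.List.pyGetD arr index 0) 0 + index)) 0

-- ===== PORT B =====
def user_logic_alt (n : Int) (arr : List Int) : Int :=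
  (PySem.List.enumerate arr 0).foldl
    (fun total p => total + ((arr.countP (fun x => x ≤ p.2) : Int) - 1 + p.1)) 0

-- ===== PRECONDITION & SPEC =====
def Spec_user_logic (n : Int) (arr : List Int) (out : Int) : Prop := out = user_logic_alt n arr
instance (n : Int) (arr : List Int) (out : Int) : Decidable (Spec_user_logic n arr out) := by unfold Spec_user_logic; infer_instance

-- ===== CLAIM (what is proved, stated in full; the proofs are below) =====
def Claim_equal_user_logic : Prop := ∀ (n : Int) (arr : List Int), Dom_user_logic n arr → Spec_user_logic n arr (user_logic n arr)

-- ===== LEMMAS AND PROOFS =====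

-- The dict built from a sorted list maps v to its last sorted index = countP (≤ v) - 1.
theorem pv_dict_getD (s : List Int) (hs : s.Pairwise (· ≤ ·)) (v : Int) (hv : v ∈ s) :
    ((PySem.List.enumerate s 0).foldl (fun d p => d.insert p.2 p.1) (PySem.Dict.empty : PySem.Dict Int Int)).getD v 0
      = (s.countP (fun x => x ≤ v) : Int) - 1 := by
  induction s using List.reverseRecOn with
  | nil => simp at hv
  | append_singleton t a ih =>
    rw [List.pairwise_append] at hs
    obtain ⟨hts, -, hta⟩ := hs
    rw [PySem.List.enumerate_append, List.foldl_append]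
    simp only [PySem.List.enumerate_cons, PySem.List.enumerate_nil, List.foldl_cons, List.foldl_nil]
    rw [PySem.Dict.getD_insert]
    by_cases hva : v = a
    · subst hva
      have hall : t.countP (fun x => decide (x ≤ v)) = t.length := by
        rw [List.countP_eq_length]
        intro x hx; simpa using hta x hx v (by simp)
      simp [List.countP_append, hall]
    · have hvt : v ∈ t := by
        rcases List.mem_append.mp hv with h | h
        · exact h
        · exact absurd (by simpa using h) hva
      have hav : ¬ (a ≤ v) := by
        have := hta v hvt a (by simp)
        omega
      rw [if_neg hva, ih hts hvt]
      simp [List.countP_append, hav]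

-- a fold over range(len(s)) reading s[j] is a fold over enumerate(s)
theorem pv_foldl_range_enum {α β : Type} [Inhabited α] (s : List α) (d : α)
    (f : β → Int → α → β) (init : β) :
    (PySem.List.pyRange 0 (PySem.List.len s) 1).foldl
        (fun acc j => f acc j (PySem.List.pyGetD s j d)) init
      = (PySem.List.enumerate s 0).foldl (fun acc p => f acc p.1 p.2) init := by
  rw [PySem.List.enumerate_eq_map_pyRange (d := d), List.foldl_map]

theorem user_logic_eq (n : Int) (arr : List Int) : user_logic n arr = user_logic_alt n arr := by
  simp only [user_logic, user_logic_alt]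
  have e1 : (PySem.List.pyRange 0 (PySem.List.len (PySem.List.sorted arr (fun x => x) false)) 1).foldl
        (fun d index => d.insert (PySem.List.pyGetD (PySem.List.sorted arr (fun x => x) false) index 0) index)
        (PySem.Dict.empty : PySem.Dict Int Int)
      = (PySem.List.enumerate (PySem.List.sorted arr (fun x => x) false) 0).foldl
        (fun d p => d.insert p.2 p.1) (PySem.Dict.empty : PySem.Dict Int Int) :=
    pv_foldl_range_enum (PySem.List.sorted arr (fun x => x) false) 0 (fun (d : PySem.Dict Int Int) (j x : Int) => d.insert x j) PySem.Dict.empty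
  rw [e1]
  have e2 : ∀ (D : PySem.Dict Int Int),
      (PySem.List.pyRange 0 (PySem.List.len arr) 1).foldl
        (fun result index => result + (D.getD (PySem.List.pyGetD arr index 0) 0 + index)) 0
      = (PySem.List.enumerate arr 0).foldl (fun acc p => acc + (D.getD p.2 0 + p.1)) 0 :=
    fun D => pv_foldl_range_enum arr 0 (fun r j x => r + (D.getD x 0 + j)) 0
  rw [e2]
  apply PySem.List.foldl_congr_mem
  intro acc p hp
  have hmem : p.2 ∈ arr := by
    rcases (PySem.List.mem_enumerate_iff _ _ _).mp hp with ⟨k, hk, rfl⟩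
    exact List.getElem_mem _
  have hmem' : p.2 ∈ PySem.List.sorted arr (fun x => x) false :=
    (PySem.List.mem_sorted _ _ _ _).mpr hmem
  rw [pv_dict_getD _ (by simpa using PySem.List.sorted_pairwise arr (fun x => x)) _ hmem',
      (PySem.List.sorted_perm arr (fun x => x) false).countP_eq]

-- ===== VERDICT (by name: the statement is the Claim_ definition above) =====
theorem user_logic_spec : Claim_equal_user_logic := by
  intro n arr _
  unfold Spec_user_logic
  exact user_logic_eq n arr
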